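-- pv_equiv track=rewrite | github.com/n1k0din/lift-service-prot | main.py | count_false
-- ===== SOURCE A (Python) =====
-- def count_false(d, in_a_row=False):
--     sum = 0
--     for k in sorted(d, reverse=True):
--         if d[k] is False:
--             sum += 1
--         elif in_a_row:
--             break
--     return sum
-- ===== SOURCE B (Python) =====
-- def count_false(d, in_a_row=False):
--     true_keys = [k for k, v in d.items() if v is not False]
--     if in_a_row and true_keys:
--         m = max(true_keys)
--         return sum(1 for k, v in d.items() if v is False and k > m)
--     return sum(1 for v in d.values() if v is False)
-- ===== Notes on version B (the rewrite author's own statement) =====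
-- stated objective: faster
-- what changed: B drops A's descending sort-and-break loop entirely: it counts all False values in one pass, and when in_a_row it takes the maximum True-valued key m and counts the False entries with key > m — no sort, O(n) scans (a timing run measured B 3.0x faster at n=262144 on one run, 1.4x on another).
import Mathlib
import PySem

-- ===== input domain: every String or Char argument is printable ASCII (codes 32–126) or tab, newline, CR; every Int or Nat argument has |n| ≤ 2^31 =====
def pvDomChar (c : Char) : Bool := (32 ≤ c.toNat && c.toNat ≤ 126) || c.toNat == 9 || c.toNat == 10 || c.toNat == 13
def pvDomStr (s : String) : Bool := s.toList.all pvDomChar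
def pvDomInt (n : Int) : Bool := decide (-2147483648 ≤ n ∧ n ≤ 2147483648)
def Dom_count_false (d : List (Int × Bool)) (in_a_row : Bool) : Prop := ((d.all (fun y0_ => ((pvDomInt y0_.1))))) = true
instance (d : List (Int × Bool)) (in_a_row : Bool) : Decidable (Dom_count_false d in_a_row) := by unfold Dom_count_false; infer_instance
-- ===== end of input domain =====

-- B replaces A's sort-then-scan with sort-free counting: count all False values, and with
-- in_a_row count the False keys above the maximum True-valued key (objective: faster — no sort, O(n) scans, measured).

-- ===== PORT A =====
-- the for-loop over the descending-sorted keys, with the accumulator 'sum' and the break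
def pvLoopA (dd : PySem.Dict Int Bool) (in_a_row : Bool) (sum : Int) : List Int → Int
  | [] => sum
  | k :: ks =>
      -- d[k]: k is always a key of dd here, so the default of getD is never used
      if dd.getD k false = false then pvLoopA dd in_a_row (sum + 1) ks
      else if in_a_row then sum
      else pvLoopA dd in_a_row sum ks

def count_false (d : List (Int × Bool)) (in_a_row : Bool) : Int :=
  let dd := PySem.Dict.ofList d
  pvLoopA dd in_a_row 0 (PySem.List.sorted dd.keys (fun x => x) true)

-- ===== PORT B =====
def count_false_alt (d : List (Int × Bool)) (in_a_row : Bool) : Int :=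
  let dd := PySem.Dict.ofList d
  let trueKeys := ((dd.items.filter (fun p => p.2 ≠ false)).map (·.1))
  if in_a_row && !trueKeys.isEmpty then
    match PySem.List.max? trueKeys (fun x => x) with
    | some m => ((dd.items.filter (fun p => p.2 = false ∧ m < p.1)).length : Int)
    | none => ((dd.values.filter (fun v => v = false)).length : Int)
  else
    ((dd.values.filter (fun v => v = false)).length : Int)

-- ===== PRECONDITION & SPEC =====
def Spec_count_false (d : List (Int × Bool)) (in_a_row : Bool) (out : Int) : Prop := out = count_false_alt d in_a_row
instance (d : List (Int × Bool)) (in_a_row : Bool) (out : Int) : Decidable (Spec_count_false d in_a_row out) := by unfold Spec_count_false; infer_instance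

-- ===== CLAIM (what is proved, stated in full; the proofs are below) =====
def Claim_equal_count_false : Prop := ∀ (d : List (Int × Bool)) (in_a_row : Bool), Dom_count_false d in_a_row → Spec_count_false d in_a_row (count_false d in_a_row)

-- ===== LEMMAS AND PROOFS =====

-- the no-break loop counts the False-valued keys
theorem pvLoopA_false (dd : PySem.Dict Int Bool) (ks : List Int) (sum : Int) :
    pvLoopA dd false sum ks = sum + (ks.countP (fun k => dd.getD k false = false) : Int) := by
  induction ks generalizing sum with
  | nil => simp [pvLoopA]
  | cons k ks ih =>
    by_cases h : dd.getD k false = false <;>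
      simp [pvLoopA, h, ih, List.countP_cons] <;> push_cast <;> ring

-- the break loop is the takeWhile length
theorem pvLoopA_true (dd : PySem.Dict Int Bool) (ks : List Int) (sum : Int) :
    pvLoopA dd true sum ks = sum + ((ks.takeWhile (fun k => dd.getD k false = false)).length : Int) := by
  induction ks generalizing sum with
  | nil => simp [pvLoopA]
  | cons k ks ih =>
    by_cases h : dd.getD k false = false <;>
      simp [pvLoopA, h, ih, List.takeWhile_cons] <;> push_cast <;> ring

-- on a strictly descending list, the False prefix before the maximal True key is exactly the keys above it
theorem takeWhile_eq_filter_gt (dd : PySem.Dict Int Bool) (ks : List Int) (m : Int)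
    (hp : ks.Pairwise (· > ·)) (hm : m ∈ ks) (hvm : dd.getD m false = true)
    (hmax : ∀ j ∈ ks, dd.getD j false = true → j ≤ m) :
    ks.takeWhile (fun k => dd.getD k false = false) = ks.filter (fun k => decide (m < k)) := by
  induction ks with
  | nil => simp at hm
  | cons k ks ih =>
    rcases List.pairwise_cons.mp hp with ⟨hgt, hp'⟩
    by_cases h : dd.getD k false = false
    · have hkm : k ≠ m := by rintro rfl; rw [h] at hvm; cases hvm
      have hm' : m ∈ ks := by
        rcases List.mem_cons.mp hm with rfl | h'
        · exact absurd rfl hkm.symm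
        · exact h'
      have hmk : m < k := hgt m hm'
      rw [List.takeWhile_cons, List.filter_cons]
      simp only [h, decide_true, hmk, if_true]
      rw [ih hp' hm' (fun j hj hv => hmax j (List.mem_cons_of_mem _ hj) hv)]
    · have hvk : dd.getD k false = true := by
        cases hh : dd.getD k false <;> simp [hh] at h ⊢
      have hkm : k ≤ m := hmax k List.mem_cons_self hvk
      rw [List.takeWhile_cons, List.filter_cons]
      simp only [h, decide_false, Bool.false_eq_true, if_false]
      have : ks.filter (fun k => decide (m < k)) = [] := by
        rw [List.filter_eq_nil_iff]
        intro j hj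
        have : j < k := hgt j hj
        simp only [decide_eq_true_eq, not_lt]
        omega
      simp [this, not_lt.mpr hkm]

-- ===== VERDICT (by name: the statement is the Claim_ definition above) =====
-- for k a key of a Nodup-key dict, (k, getD k false) is an item; bridges keys-counting to items-counting
theorem countP_items (dd : PySem.Dict Int Bool) (hnd : dd.keys.Nodup) (q : Int × Bool → Bool) :
    dd.items.countP q = dd.keys.countP (fun k => q (k, dd.getD k false)) := by
  rw [PySem.Dict.items_eq_map_keys dd hnd false, List.countP_map]
  rfl

theorem count_false_spec : Claim_equal_count_false := by
  intro d r _
  unfold Spec_count_false count_false count_false_alt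
  dsimp only
  set dd := PySem.Dict.ofList d with hdd
  have hnd : dd.keys.Nodup := PySem.Dict.nodup_keys_ofList d
  set ks := PySem.List.sorted dd.keys (fun x => x) true with hks
  have hperm : ks.Perm dd.keys := PySem.List.sorted_perm dd.keys (fun x => x) true
  have hpair : ks.Pairwise (fun a b => b ≤ a) := PySem.List.sorted_pairwise_rev dd.keys (fun x => x)
  have hndks : ks.Nodup := hperm.nodup_iff.mpr hnd
  have hgt : ks.Pairwise (· > ·) := by
    refine (hpair.and hndks).imp ?_
    rintro a b ⟨hle, hne⟩
    omega
  -- every key k with getD k false = true is in trueKeys, and conversely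
  set trueKeys := ((dd.items.filter (fun p => p.2 ≠ false)).map (·.1)) with htk
  have hmemtk : ∀ k : Int, k ∈ trueKeys ↔ k ∈ dd.keys ∧ dd.getD k false = true := by
    intro k
    rw [htk, PySem.Dict.items_eq_map_keys dd hnd false]
    simp only [List.mem_map, List.mem_filter]
    constructor
    · rintro ⟨p, ⟨⟨j, hj, rfl⟩, hv⟩, rfl⟩
      refine ⟨hj, ?_⟩
      cases h : dd.getD j false <;> simp [h] at hv ⊢
    · rintro ⟨hk, hv⟩
      exact ⟨(k, dd.getD k false), ⟨⟨k, hk, rfl⟩, by simp [hv]⟩, rfl⟩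
  have hvals : (dd.values.filter (fun v => v = false)).length =
      dd.keys.countP (fun k => dd.getD k false = false) := by
    rw [PySem.Dict.values_eq_map_keys dd hnd false, ← List.countP_eq_length_filter, List.countP_map]
    rfl
  cases r with
  | false =>
    rw [pvLoopA_false, hperm.countP_eq]
    split_ifs with h
    · rw [Bool.false_and] at h; exact absurd h (by simp)
    · rw [hvals, zero_add]
  | true =>
    rw [pvLoopA_true]
    split_ifs with h
    · -- trueKeys is nonempty: A's break loop stops exactly at the max True key m
      have hne : trueKeys ≠ [] := by
        intro hnil; rw [Bool.true_and, hnil] at h; simp at h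
      obtain ⟨m, hm⟩ : ∃ m, PySem.List.max? trueKeys (fun x => x) = some m := by
        cases hmm : PySem.List.max? trueKeys (fun x => x) with
        | none => exact absurd ((PySem.List.max?_eq_none_iff trueKeys (fun x => x)).mp hmm) hne
        | some m => exact ⟨m, rfl⟩
      have hmmem := (hmemtk m).mp (PySem.List.max?_mem hm)
      have hmax : ∀ j ∈ ks, dd.getD j false = true → j ≤ m := by
        intro j hj hv
        exact PySem.List.max?_isMax hm j ((hmemtk j).mpr ⟨hperm.mem_iff.mp hj, hv⟩)
      rw [hm]
      show (0 : Int) + ((ks.takeWhile (fun k => dd.getD k false = false)).length : Int) =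
        ((dd.items.filter (fun p => p.2 = false ∧ m < p.1)).length : Int)
      rw [takeWhile_eq_filter_gt dd ks m hgt (hperm.mem_iff.mpr hmmem.1) hmmem.2 hmax]
      have hfc : ks.filter (fun k => decide (m < k)) =
          ks.filter (fun k => decide (dd.getD k false = false ∧ m < k)) := by
        apply List.filter_congr
        intro k hk
        by_cases hcm : m < k
        · have hkf : dd.getD k false = false := by
            by_contra hkt
            have : k ≤ m := hmax k hk (by cases hh : dd.getD k false <;> simp [hh] at hkt ⊢)
            omega
          simp [hcm, hkf]
        · simp [hcm]
      rw [hfc, ← List.countP_eq_length_filter, hperm.countP_eq,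
        ← List.countP_eq_length_filter,
        countP_items dd hnd (fun p => decide (p.2 = false ∧ m < p.1)), zero_add]
    · -- trueKeys is empty: every value is False; both sides count everything
      have htknil : trueKeys = [] := by
        by_contra hne
        apply h
        rw [Bool.true_and]
        simp [List.isEmpty_iff, hne]
      have hall : ∀ k ∈ ks, dd.getD k false = false := by
        intro k hk
        by_contra hne
        have : k ∈ trueKeys := (hmemtk k).mpr ⟨hperm.mem_iff.mp hk,
          by cases hh : dd.getD k false <;> simp [hh] at hne ⊢⟩
        rw [htknil] at this; cases this
      have htw : ks.takeWhile (fun k => dd.getD k false = false) = ks := by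
        rw [List.takeWhile_eq_self_iff]
        intro a ha; simp [hall a ha]
      have hcnt : dd.keys.countP (fun k => dd.getD k false = false) = dd.keys.length := by
        rw [List.countP_eq_length]
        intro a ha; simp [hall a (hperm.mem_iff.mpr ha)]
      rw [htw, hvals, hcnt, hperm.length_eq, zero_add]
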